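-- pv_equiv track=rewrite | github.com/zhihao-chen/NLP-experiments | nlp/processors/utils_ee.py | get_char2tok_span
-- ===== SOURCE A (Python) =====
-- def get_char2tok_span(tok2char_span):
--     """
--     get a map from character level index to token level span
--     e.g. "She is singing" -> [
--                              [0, 1], [0, 1], [0, 1], # She
--                              [-1, -1] # whitespace
--                              [1, 2], [1, 2], # is
--                              [-1, -1] # whitespace
--                              [2, 3], [2, 3], [2, 3], [2, 3], [2, 3], [2, 3], [2, 3] # singing
--                              ]
--
--      tok2char_span： a map from token index to character level span
--     """
--
--     # get the number of characters
--     char_num = None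
--     for tok_ind in range(len(tok2char_span) - 1, -1, -1):
--         if tok2char_span[tok_ind][1] != 0:
--             char_num = tok2char_span[tok_ind][1]
--             break
--
--     # build a map: char index to token level span
--     char2tok_span = [[-1, -1] for _ in range(char_num)]  # 除了空格，其他字符均有对应token
--     for tok_ind, char_sp in enumerate(tok2char_span):
--         for char_ind in range(char_sp[0], char_sp[1]):
--             tok_sp = char2tok_span[char_ind]
--             # 因为在bert中，char to tok 也可能出现1对多的情况，比如韩文。
--             # 所以char_span的pos1以第一个tok_ind为准，pos2以最后一个tok_ind为准
--             if tok_sp[0] == -1:  # 第一次赋值以后不再修改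
--                 tok_sp[0] = tok_ind
--             tok_sp[1] = tok_ind + 1  # 每一次都更新
--     return char2tok_span
-- ===== SOURCE B (Python) =====
-- def get_char2tok_span(tok2char_span):
--     # character count: end of the LAST token whose span end is nonzero
--     ends = [sp[1] for sp in tok2char_span if sp[1] != 0]
--     char_num = ends[-1]
--     # transposed traversal: for each character, collect the tokens covering it
--     char2tok_span = []
--     for char_ind in range(char_num):
--         covering = [tok_ind for tok_ind, sp in enumerate(tok2char_span)
--                     if sp[0] <= char_ind < sp[1]]
--         if covering:
--             char2tok_span.append([covering[0], covering[-1] + 1])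
--         else:
--             char2tok_span.append([-1, -1])
--     return char2tok_span
-- ===== Notes on version B (the rewrite author's own statement) =====
-- stated objective: alternative
-- what changed: B keeps the same char_num (end of the last token with nonzero span end, via a comprehension) but replaces A's token-outer loop that mutates a preallocated array in place (first-assign/update-always trick, with Python negative-index wraparound on negative starts) by a transposed, pure traversal: for each character index it collects the list of tokens covering it and emits [first, last+1] or [-1,-1].
-- outside the precondition, e.g. on get_char2tok_span([[-1, 1], [0, 2]]): A returns [[0, 2], [0, 2]], B returns [[0, 2], [1, 2]]
import Mathlib
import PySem

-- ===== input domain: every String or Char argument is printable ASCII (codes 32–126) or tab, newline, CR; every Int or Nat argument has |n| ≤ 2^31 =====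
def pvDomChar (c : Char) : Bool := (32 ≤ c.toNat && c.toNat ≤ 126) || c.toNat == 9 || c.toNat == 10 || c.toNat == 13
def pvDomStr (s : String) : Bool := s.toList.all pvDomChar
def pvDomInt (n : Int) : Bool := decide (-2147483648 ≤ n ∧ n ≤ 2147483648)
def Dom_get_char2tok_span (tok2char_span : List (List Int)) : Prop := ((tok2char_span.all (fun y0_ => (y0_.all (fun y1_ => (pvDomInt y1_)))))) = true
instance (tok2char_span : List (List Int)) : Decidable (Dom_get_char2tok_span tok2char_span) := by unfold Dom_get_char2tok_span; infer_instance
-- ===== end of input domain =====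

-- B replaces A's in-place token-outer sweep by a pure transposed traversal (for each character,
-- the list of covering tokens, then [first, last+1]); alternative decomposition, not claimed faster.


-- ===== PORT A =====
-- reverse scan: for tok_ind in range(len-1, -1, -1): if l[tok_ind][1] != 0: char_num = l[tok_ind][1]; break
-- (returns none where Python leaves char_num = None and then raises TypeError; excluded by Pre_)
def pvFindCharNum (l : List (List Int)) : List Int → Option Int
  | [] => none
  | i :: rest =>
      let e := PySem.List.pyGetD (PySem.List.pyGetD l i []) 1 0
      if e ≠ 0 then some e else pvFindCharNum l rest

-- tok_sp = char2tok_span[char_ind]; if tok_sp[0] == -1: tok_sp[0] = tok_ind; tok_sp[1] = tok_ind + 1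
def pvWrite (st : List (List Int)) (ci ti : Int) : List (List Int) :=
  let tok_sp := PySem.List.pyGetD st ci []
  let new := if PySem.List.pyGetD tok_sp 0 0 = -1
             then [ti, ti + 1]
             else [PySem.List.pyGetD tok_sp 0 0, ti + 1]
  PySem.List.pySetD st ci new

def get_char2tok_span (tok2char_span : List (List Int)) : List (List Int) :=
  match pvFindCharNum tok2char_span
          (PySem.List.pyRange ((tok2char_span.length : Int) - 1) (-1) (-1)) with
  | none => []   -- Python raises TypeError here (char_num is None); outside Pre_
  | some char_num =>
      let init := (PySem.List.pyRange 0 char_num 1).map (fun _ => ([-1, -1] : List Int))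
      (PySem.List.enumerate tok2char_span 0).foldl
        (fun st p =>
          (PySem.List.pyRange (PySem.List.pyGetD p.2 0 0) (PySem.List.pyGetD p.2 1 0) 1).foldl
            (fun st ci => pvWrite st ci p.1) st)
        init

-- ===== PORT B =====
-- covering = [tok_ind for tok_ind, sp in enumerate(tok2char_span) if sp[0] <= char_ind < sp[1]]
def pvCovering (l : List (List Int)) (ci : Int) : List Int :=
  ((PySem.List.enumerate l 0).filter
      (fun p => decide (PySem.List.pyGetD p.2 0 0 ≤ ci ∧ ci < PySem.List.pyGetD p.2 1 0))).map (·.1)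

def get_char2tok_span_alt (tok2char_span : List (List Int)) : List (List Int) :=
  let ends := (tok2char_span.filter (fun sp => decide (PySem.List.pyGetD sp 1 0 ≠ 0))).map
                (fun sp => PySem.List.pyGetD sp 1 0)
  match ends.getLast? with
  | none => []   -- Python raises IndexError on ends[-1]; outside Pre_
  | some char_num =>
      (PySem.List.pyRange 0 char_num 1).map (fun char_ind =>
        let covering := pvCovering tok2char_span char_ind
        if covering.isEmpty then ([-1, -1] : List Int)
        else [PySem.List.pyGetD covering 0 0, PySem.List.pyGetD covering (-1) 0 + 1])

-- ===== PRECONDITION & SPEC =====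
-- char_num as A computes it when it exists: the span end of the last token whose span end is nonzero
def pvLastEnd (l : List (List Int)) : Int :=
  ((l.filterMap (fun sp => if PySem.List.pyGetD sp 1 0 ≠ 0 then some (PySem.List.pyGetD sp 1 0) else none)).getLast?).getD 0

-- Pre_ restricts to the natural domain of tokenizer spans: every span has at least 2 entries and some
-- span end is nonzero (otherwise A raises IndexError/TypeError), and every nonempty span is a character
-- interval inside [0, char_num]: spans reaching past char_num make A raise IndexError, while NEGATIVE
-- span starts are malformed input on which A silently writes through Python's negative-index wraparound.
def Pre_get_char2tok_span (tok2char_span : List (List Int)) : Prop :=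
  (∀ sp ∈ tok2char_span, 2 ≤ sp.length) ∧
  (∃ sp ∈ tok2char_span, PySem.List.pyGetD sp 1 0 ≠ 0) ∧
  (∀ sp ∈ tok2char_span, PySem.List.pyGetD sp 0 0 < PySem.List.pyGetD sp 1 0 →
     0 ≤ PySem.List.pyGetD sp 0 0 ∧ PySem.List.pyGetD sp 1 0 ≤ pvLastEnd tok2char_span)

instance (tok2char_span : List (List Int)) : Decidable (Pre_get_char2tok_span tok2char_span) := by
  unfold Pre_get_char2tok_span; infer_instance

def pvWitness_get_char2tok_span : List (List Int) := [[0, 3], [4, 6], [6, 7]]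

def Spec_get_char2tok_span (tok2char_span : List (List Int)) (out : List (List Int)) : Prop := out = get_char2tok_span_alt tok2char_span
instance (tok2char_span : List (List Int)) (out : List (List Int)) : Decidable (Spec_get_char2tok_span tok2char_span out) := by unfold Spec_get_char2tok_span; infer_instance

-- ===== CLAIM (what is proved, stated in full; the proofs are below) =====
def Claim_equal_get_char2tok_span : Prop := ∀ (tok2char_span : List (List Int)), Dom_get_char2tok_span tok2char_span → Pre_get_char2tok_span tok2char_span → Spec_get_char2tok_span tok2char_span (get_char2tok_span tok2char_span)

-- ===== LEMMAS AND PROOFS =====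

-- the per-entry update A performs on one write
def pvStep (e : List Int) (ti : Int) : List Int :=
  if PySem.List.pyGetD e 0 0 = -1 then [ti, ti + 1] else [PySem.List.pyGetD e 0 0, ti + 1]

-- the per-character fold of A's writes, token by token
def pvFoldChar (toks : List (Int × List Int)) (j : Int) (e : List Int) : List Int :=
  toks.foldl (fun e t =>
    if PySem.List.pyGetD t.2 0 0 ≤ j ∧ j < PySem.List.pyGetD t.2 1 0 then pvStep e t.1 else e) e

theorem pvWrite_length (ti : Int) (l : List Int) (st : List (List Int)) :
    (l.foldl (fun st ci => pvWrite st ci ti) st).length = st.length := by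
  induction l generalizing st with
  | nil => rfl
  | cons x xs ih =>
      rw [List.foldl_cons, ih]
      simp [pvWrite, PySem.List.length_pySetD]

theorem pvInner (a b ti : Int) (st : List (List Int)) (ha : 0 ≤ a) (hb : b ≤ (st.length : Int))
    (j : Nat) :
    ((PySem.List.pyRange a b 1).foldl (fun st ci => pvWrite st ci ti) st)[j]? =
      st[j]?.map (fun e => if a ≤ (j : Int) ∧ (j : Int) < b then pvStep e ti else e) := by
  have key : ∀ (n : Nat) (a : Int) (st : List (List Int)), 0 ≤ a → b ≤ (st.length : Int) →
      (b - a).toNat = n →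
      ((PySem.List.pyRange a b 1).foldl (fun st ci => pvWrite st ci ti) st)[j]? =
        st[j]?.map (fun e => if a ≤ (j : Int) ∧ (j : Int) < b then pvStep e ti else e) := by
    intro n
    induction n with
    | zero =>
        intro a st ha hb hn
        rw [PySem.List.pyRange_one_eq_nil (by omega), List.foldl_nil]
        cases h : st[j]? with
        | none => rfl
        | some e => simp only [Option.map_some]; rw [if_neg (by omega)]
    | succ n ih =>
        intro a st ha hb hn
        have hab : a < b := by omega
        have halen : a.toNat < st.length := by omega
        rw [PySem.List.pyRange_one_cons hab, List.foldl_cons]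
        have hw : pvWrite st a ti = st.set a.toNat (pvStep (st[a.toNat]'halen) ti) := by
          simp only [pvWrite, pvStep]
          rw [PySem.List.pyGetD_eq_getElem st [] ha (by omega),
            PySem.List.pySetD_of_nonneg _ _ ha]
        rw [hw, ih (a + 1) _ (by omega) (by simp; omega) (by omega)]
        rw [List.getElem?_set]
        by_cases hja : a.toNat = j
        · subst hja
          rw [if_pos rfl, if_pos halen, List.getElem?_eq_getElem halen]
          simp only [Option.map_some]
          rw [if_neg (by omega), if_pos (by omega)]
        · rw [if_neg hja]
          have hj : (j : Int) ≠ a := by omega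
          cases h : st[j]? with
          | none => rfl
          | some e =>
              simp only [Option.map_some]
              exact congrArg some (if_congr (by omega) rfl rfl)
  exact key (b - a).toNat a st ha hb rfl

theorem pvOuter (toks : List (Int × List Int)) (st : List (List Int))
    (hb : ∀ t ∈ toks, PySem.List.pyGetD t.2 0 0 < PySem.List.pyGetD t.2 1 0 →
            0 ≤ PySem.List.pyGetD t.2 0 0 ∧ PySem.List.pyGetD t.2 1 0 ≤ (st.length : Int))
    (j : Nat) :
    (toks.foldl (fun st p =>
        (PySem.List.pyRange (PySem.List.pyGetD p.2 0 0) (PySem.List.pyGetD p.2 1 0) 1).foldl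
          (fun st ci => pvWrite st ci p.1) st) st)[j]? =
      st[j]?.map (fun e => pvFoldChar toks (j : Int) e) := by
  induction toks generalizing st with
  | nil =>
      simp only [List.foldl_nil, pvFoldChar]
      cases st[j]? <;> rfl
  | cons t toks ih =>
      rw [List.foldl_cons]
      have hlen : ((PySem.List.pyRange (PySem.List.pyGetD t.2 0 0) (PySem.List.pyGetD t.2 1 0) 1).foldl
          (fun st ci => pvWrite st ci t.1) st).length = st.length := pvWrite_length _ _ _
      rw [ih _ (by rw [hlen]; exact fun u hu => hb u (List.mem_cons_of_mem _ hu))]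
      by_cases hc : PySem.List.pyGetD t.2 0 0 < PySem.List.pyGetD t.2 1 0
      · obtain ⟨h0, h1⟩ := hb t List.mem_cons_self hc
        rw [pvInner _ _ _ _ h0 h1, Option.map_map]
        cases h : st[j]? with
        | none => rfl
        | some e =>
            simp only [Option.map_some, Function.comp]
            congr 1
      · rw [PySem.List.pyRange_one_eq_nil (by omega), List.foldl_nil]
        cases h : st[j]? with
        | none => rfl
        | some e =>
            simp only [Option.map_some]
            congr 1
            simp only [pvFoldChar, List.foldl_cons]
            rw [if_neg (by omega)]

theorem pvCharEq (toks : List (Int × List Int)) (j : Int) (e : List Int)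
    (hfst : ∀ t ∈ toks, (0 : Int) ≤ t.1) :
    pvFoldChar toks j e =
      (if ((toks.filter (fun p => decide (PySem.List.pyGetD p.2 0 0 ≤ j ∧ j < PySem.List.pyGetD p.2 1 0))).map (·.1)).isEmpty
       then e
       else [if PySem.List.pyGetD e 0 0 = -1
             then ((toks.filter (fun p => decide (PySem.List.pyGetD p.2 0 0 ≤ j ∧ j < PySem.List.pyGetD p.2 1 0))).map (·.1)).headD 0
             else PySem.List.pyGetD e 0 0,
             ((toks.filter (fun p => decide (PySem.List.pyGetD p.2 0 0 ≤ j ∧ j < PySem.List.pyGetD p.2 1 0))).map (·.1)).getLastD 0 + 1]) := by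
  induction toks generalizing e with
  | nil => simp [pvFoldChar]
  | cons t toks ih =>
      have hfst' : ∀ u ∈ toks, (0 : Int) ≤ u.1 := fun u hu => hfst u (List.mem_cons_of_mem _ hu)
      have ht : (0 : Int) ≤ t.1 := hfst t List.mem_cons_self
      by_cases hc : PySem.List.pyGetD t.2 0 0 ≤ j ∧ j < PySem.List.pyGetD t.2 1 0
      · have hstep : pvFoldChar (t :: toks) j e = pvFoldChar toks j (pvStep e t.1) := by
          simp only [pvFoldChar, List.foldl_cons, if_pos hc]
        rw [hstep, ih _ hfst', List.filter_cons_of_pos (by simpa using hc), List.map_cons]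
        have hg0 : PySem.List.pyGetD (pvStep e t.1) 0 0 =
            (if PySem.List.pyGetD e 0 0 = -1 then t.1 else PySem.List.pyGetD e 0 0) := by
          rw [pvStep]; split_ifs <;> rw [PySem.List.pyGetD_zero_cons]
        have hg0ne : PySem.List.pyGetD (pvStep e t.1) 0 0 ≠ -1 := by
          rw [hg0]; split_ifs with h <;> [omega; exact h]
        simp only [List.isEmpty_cons, Bool.false_eq_true, if_false, List.headD_cons,
          List.getLastD_cons]
        cases hcov : (toks.filter (fun p => decide (PySem.List.pyGetD p.2 0 0 ≤ j ∧ j < PySem.List.pyGetD p.2 1 0))).map (·.1) with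
        | nil =>
            simp only [List.isEmpty_nil, if_true, List.getLastD_nil]
            rw [pvStep]; split_ifs <;> rfl
        | cons x xs =>
            simp only [List.isEmpty_cons, Bool.false_eq_true, if_false]
            rw [if_neg hg0ne, hg0, List.getLastD_cons, List.getLastD_cons]
      · have hstep : pvFoldChar (t :: toks) j e = pvFoldChar toks j e := by
          simp only [pvFoldChar, List.foldl_cons, if_neg hc]
        rw [hstep, ih _ hfst', List.filter_cons_of_neg (by simpa using hc)]

theorem pvScan (l ext : List (List Int)) :
    pvFindCharNum (l ++ ext) (PySem.List.pyRange ((l.length : Int) - 1) (-1) (-1)) =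
      (l.filterMap (fun sp => if PySem.List.pyGetD sp 1 0 ≠ 0 then some (PySem.List.pyGetD sp 1 0) else none)).getLast? := by
  induction l using List.reverseRecOn generalizing ext with
  | nil =>
      rw [PySem.List.pyRange_neg_one_eq_nil (by norm_num)]
      rfl
  | append_singleton l sp ih =>
      have hlen : (((l ++ [sp]).length : Int)) - 1 = (l.length : Int) := by
        simp
      rw [hlen, PySem.List.pyRange_neg_one_cons (by omega)]
      have hmid : l ++ [sp] ++ ext = l ++ sp :: ext := by simp
      have hget : PySem.List.pyGetD (l ++ [sp] ++ ext) ((l.length : Int)) [] = sp := by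
        rw [hmid, PySem.List.pyGetD_natCast, List.getD, List.getElem?_append_right (Nat.le_refl _)]
        simp
      rw [pvFindCharNum]
      simp only [hget, List.filterMap_append, List.filterMap_cons, List.filterMap_nil]
      by_cases h : PySem.List.pyGetD sp 1 0 ≠ 0
      · rw [if_pos h, if_pos h, List.getLast?_concat]
      · rw [if_neg h, if_neg h, List.append_nil]
        rw [hmid]
        have hr : pvFindCharNum (l ++ sp :: ext) (PySem.List.pyRange ((l.length : Int) - 1) (-1) (-1)) =
            (l.filterMap (fun sp => if PySem.List.pyGetD sp 1 0 ≠ 0 then some (PySem.List.pyGetD sp 1 0) else none)).getLast? := ih (sp :: ext)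
        exact hr

theorem pvEnds (l : List (List Int)) :
    (l.filter (fun sp => decide (PySem.List.pyGetD sp 1 0 ≠ 0))).map (fun sp => PySem.List.pyGetD sp 1 0) =
      l.filterMap (fun sp => if PySem.List.pyGetD sp 1 0 ≠ 0 then some (PySem.List.pyGetD sp 1 0) else none) := by
  induction l with
  | nil => rfl
  | cons x xs ih =>
      rw [List.filter_cons, List.filterMap_cons]
      by_cases h : PySem.List.pyGetD x 1 0 ≠ 0
      · rw [if_pos (decide_eq_true h), if_pos h, List.map_cons, ih]
      · rw [if_neg (by simpa using h), if_neg h, ih]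

theorem pvLastNeg (x : Int) (xs : List Int) :
    PySem.List.pyGetD (x :: xs) (-1) 0 = (x :: xs).getLastD 0 := by
  rw [PySem.List.pyGetD_neg_one _ 0 (List.cons_ne_nil x xs), List.getLastD_eq_getLast?,
    List.getLast?_eq_some_getLast (List.cons_ne_nil x xs)]
  rfl

-- ===== VERDICT (by name: the statement is the Claim_ definition above) =====
theorem get_char2tok_span_spec : Claim_equal_get_char2tok_span := by
  intro l _hdom hpre
  obtain ⟨h2, hex, h3⟩ := hpre
  unfold Spec_get_char2tok_span
  -- both sides compute the same char_num
  have hscan := pvScan l []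
  rw [List.append_nil] at hscan
  have hne : l.filterMap (fun sp => if PySem.List.pyGetD sp 1 0 ≠ 0 then some (PySem.List.pyGetD sp 1 0) else none) ≠ [] := by
    obtain ⟨sp, hsp, h⟩ := hex
    have : PySem.List.pyGetD sp 1 0 ∈ l.filterMap (fun sp => if PySem.List.pyGetD sp 1 0 ≠ 0 then some (PySem.List.pyGetD sp 1 0) else none) :=
      List.mem_filterMap.2 ⟨sp, hsp, by rw [if_pos h]⟩
    intro hnil
    rw [hnil] at this
    exact absurd this (List.not_mem_nil)
  obtain ⟨c, hc⟩ : ∃ c, (l.filterMap (fun sp => if PySem.List.pyGetD sp 1 0 ≠ 0 then some (PySem.List.pyGetD sp 1 0) else none)).getLast? = some c := by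
    cases hg : (l.filterMap (fun sp => if PySem.List.pyGetD sp 1 0 ≠ 0 then some (PySem.List.pyGetD sp 1 0) else none)).getLast? with
    | none => exact absurd (List.getLast?_eq_none_iff.1 hg) hne
    | some c => exact ⟨c, rfl⟩
  have hcval : pvLastEnd l = c := by unfold pvLastEnd; rw [hc]; rfl
  rw [get_char2tok_span, get_char2tok_span_alt, hscan, hc, pvEnds, hc]
  -- now compare the two lists entry by entry
  apply List.ext_getElem?
  intro j
  have hblen : ∀ t ∈ PySem.List.enumerate l 0,
      PySem.List.pyGetD t.2 0 0 < PySem.List.pyGetD t.2 1 0 →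
      0 ≤ PySem.List.pyGetD t.2 0 0 ∧ PySem.List.pyGetD t.2 1 0 ≤
        ((((PySem.List.pyRange 0 c 1).map (fun _ => ([-1, -1] : List Int))).length : Int)) := by
    intro t ht hlt
    obtain ⟨k, hk, rfl⟩ := (PySem.List.mem_enumerate_iff _ _ _).1 ht
    dsimp only at hlt ⊢
    have hmem : l[k] ∈ l := List.getElem_mem hk
    obtain ⟨u, v⟩ := h3 _ hmem hlt
    refine ⟨u, ?_⟩
    rw [List.length_map, PySem.List.length_pyRange_one]
    rw [hcval] at v
    omega
  rw [pvOuter _ _ hblen j, List.getElem?_map, List.getElem?_map]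
  cases hj : (PySem.List.pyRange 0 c 1)[j]? with
  | none => rfl
  | some v =>
      have hv : v = (j : Int) := by
        obtain ⟨hlt, hval⟩ := List.getElem?_eq_some_iff.1 hj
        rw [PySem.List.getElem_pyRange_one] at hval
        omega
      subst hv
      simp only [Option.map_some]
      congr 1
      rw [pvCharEq _ _ _ (by
        intro t ht
        obtain ⟨k, hk, rfl⟩ := (PySem.List.mem_enumerate_iff _ _ _).1 ht
        simp)]
      rw [PySem.List.pyGetD_zero_cons, if_pos rfl]
      show _ = if (pvCovering l (j : Int)).isEmpty then ([-1, -1] : List Int)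
        else [PySem.List.pyGetD (pvCovering l (j : Int)) 0 0,
              PySem.List.pyGetD (pvCovering l (j : Int)) (-1) 0 + 1]
      cases hcove : pvCovering l (j : Int) with
      | nil => rw [pvCovering] at hcove; rw [hcove]; rfl
      | cons x xs =>
          rw [pvCovering] at hcove
          rw [hcove, PySem.List.pyGetD_zero_cons, pvLastNeg]
          simp
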